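-- pv_equiv track=rewrite | github.com/murrayo/yaspe | chart_templates.py | infer_date_format
-- ===== SOURCE A (Python) =====
-- def infer_date_format(date_series):
--     mm_dd_count = 0
--     dd_mm_count = 0
--
--     for date_str in date_series:
--         try:
--             day, month, year = map(int, date_str.split("/"))
--
--             if 1 <= month <= 12 and 1 <= day <= 31:
--                 mm_dd_count += 1
--             if 1 <= day <= 12 and 1 <= month <= 31:
--                 dd_mm_count += 1
--         except ValueError:
--             continue
--
--     if mm_dd_count > dd_mm_count:
--         return "mm/dd/yyyy"
--     elif dd_mm_count > mm_dd_count: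
--         return "dd/mm/yyyy"
--     else:
--         return "ambiguous"
-- ===== SOURCE B (Python) =====
-- def infer_date_format(date_series):
--     # A date that is valid under both readings (both fields <= 12) or under
--     # neither contributes equally to both of A's counters, so only the
--     # "decisive" dates -- valid under exactly one reading -- matter.
--     parsed = []
--     for s in date_series:
--         try:
--             d, m, y = map(int, s.split("/"))
--         except ValueError:
--             continue
--         parsed.append((d, m))
--     mm_only = sum(1 for d, m in parsed if 1 <= m <= 12 and 13 <= d <= 31)
--     dd_only = sum(1 for d, m in parsed if 1 <= d <= 12 and 13 <= m <= 31)
--     if mm_only > dd_only: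
--         return "mm/dd/yyyy"
--     if dd_only > mm_only:
--         return "dd/mm/yyyy"
--     return "ambiguous"
-- ===== Notes on version B (the rewrite author's own statement) =====
-- stated objective: alternative
-- what changed: Instead of counting all dates valid under each of the two overlapping range patterns, B first builds a parsed list and then counts only the decisive dates, those valid under exactly one reading (month<=12 with day 13-31, or day<=12 with month 13-31), using the cancellation of dates valid under both or neither; the disjoint counts are compared the same way.
import Mathlib
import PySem

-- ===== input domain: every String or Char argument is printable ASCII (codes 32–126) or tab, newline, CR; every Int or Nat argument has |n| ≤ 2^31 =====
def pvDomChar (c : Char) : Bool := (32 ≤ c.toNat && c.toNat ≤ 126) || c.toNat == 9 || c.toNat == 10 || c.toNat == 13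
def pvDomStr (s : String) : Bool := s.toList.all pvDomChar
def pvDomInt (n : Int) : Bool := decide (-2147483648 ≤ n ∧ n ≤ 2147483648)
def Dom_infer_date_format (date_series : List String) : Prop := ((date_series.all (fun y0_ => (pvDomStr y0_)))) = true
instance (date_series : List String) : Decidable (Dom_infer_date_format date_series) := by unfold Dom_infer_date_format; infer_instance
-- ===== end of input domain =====

-- B counts only the decisive dates (valid under exactly one of the two readings) over a
-- pre-parsed list, instead of A's two overlapping validity counters (objective: alternative).

-- ===== PORT A =====
-- loop body of A; the try/except around `day, month, year = map(int, date_str.split("/"))`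
-- succeeds exactly when the split has three parts and all three parse as int (any other
-- shape raises ValueError, caught by the except), so it is ported as this option match.
def pvStepA (st : Int × Int) (date_str : String) : Int × Int :=
  match (PySem.Str.split? date_str "/").getD [] with
  | [a, b, c] =>
    match PySem.Int.ofStr? a, PySem.Int.ofStr? b, PySem.Int.ofStr? c with
    | some day, some month, some _year =>
      let st := if 1 ≤ month ∧ month ≤ 12 ∧ 1 ≤ day ∧ day ≤ 31 then (st.1 + 1, st.2) else st
      if 1 ≤ day ∧ day ≤ 12 ∧ 1 ≤ month ∧ month ≤ 31 then (st.1, st.2 + 1) else st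
    | _, _, _ => st
  | _ => st

def infer_date_format (date_series : List String) : String :=
  let counts := date_series.foldl pvStepA (0, 0)
  if counts.1 > counts.2 then "mm/dd/yyyy"
  else if counts.2 > counts.1 then "dd/mm/yyyy"
  else "ambiguous"

-- ===== PORT B =====
-- B's parse loop (try parse, continue on ValueError, append (d, m)) is the filterMap below.
def pvParseDM (date_str : String) : Option (Int × Int) :=
  match (PySem.Str.split? date_str "/").getD [] with
  | [a, b, c] =>
    match PySem.Int.ofStr? a, PySem.Int.ofStr? b, PySem.Int.ofStr? c with
    | some d, some m, some _y => some (d, m)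
    | _, _, _ => none
  | _ => none

def pvMMOnly (dm : Int × Int) : Bool := decide (1 ≤ dm.2 ∧ dm.2 ≤ 12 ∧ 13 ≤ dm.1 ∧ dm.1 ≤ 31)
def pvDDOnly (dm : Int × Int) : Bool := decide (1 ≤ dm.1 ∧ dm.1 ≤ 12 ∧ 13 ≤ dm.2 ∧ dm.2 ≤ 31)

def infer_date_format_alt (date_series : List String) : String :=
  let parsed := date_series.filterMap pvParseDM
  let mm_only : Int := (parsed.countP pvMMOnly : Nat)
  let dd_only : Int := (parsed.countP pvDDOnly : Nat)
  if mm_only > dd_only then "mm/dd/yyyy"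
  else if dd_only > mm_only then "dd/mm/yyyy"
  else "ambiguous"

-- ===== PRECONDITION & SPEC =====
def Spec_infer_date_format (date_series : List String) (out : String) : Prop := out = infer_date_format_alt date_series
instance (date_series : List String) (out : String) : Decidable (Spec_infer_date_format date_series out) := by unfold Spec_infer_date_format; infer_instance

-- ===== CLAIM (what is proved, stated in full; the proofs are below) =====
def Claim_equal_infer_date_format : Prop := ∀ (date_series : List String), Dom_infer_date_format date_series → Spec_infer_date_format date_series (infer_date_format date_series)

-- ===== LEMMAS AND PROOFS =====
-- per-element: the change in A's counter difference equals B's decisive contribution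
theorem pvStep_delta (st : Int × Int) (x : String) :
    (pvStepA st x).1 - (pvStepA st x).2 =
      st.1 - st.2 + (match pvParseDM x with
        | none => 0
        | some dm => (if pvMMOnly dm then (1 : Int) else 0) - (if pvDDOnly dm then 1 else 0)) := by
  unfold pvStepA pvParseDM pvMMOnly pvDDOnly
  rcases (PySem.Str.split? x "/").getD [] with _ | ⟨a, _ | ⟨b, _ | ⟨c, _ | ⟨d, rest⟩⟩⟩⟩ <;> simp
  rcases PySem.Int.ofStr? a with _ | da <;> rcases PySem.Int.ofStr? b with _ | mo <;>
    rcases PySem.Int.ofStr? c with _ | yr <;> simp <;> split_ifs <;> simp <;> omega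

theorem pvFold_delta (l : List String) (st : Int × Int) :
    (l.foldl pvStepA st).1 - (l.foldl pvStepA st).2 =
      st.1 - st.2 + ((l.filterMap pvParseDM).countP pvMMOnly : Int)
                  - ((l.filterMap pvParseDM).countP pvDDOnly : Int) := by
  induction l generalizing st with
  | nil => simp
  | cons x xs ih =>
    simp only [List.foldl_cons, ih, pvStep_delta, List.filterMap_cons]
    rcases h : pvParseDM x with _ | dm <;> simp [List.countP_cons] <;> split_ifs <;>
      push_cast <;> omega

-- ===== VERDICT (by name: the statement is the Claim_ definition above) =====
theorem infer_date_format_spec : Claim_equal_infer_date_format := by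
  intro l _
  unfold Spec_infer_date_format infer_date_format infer_date_format_alt
  have h := pvFold_delta l (0, 0)
  simp only at h
  rcases hc : l.foldl pvStepA (0, 0) with ⟨mm, dd⟩
  rw [hc] at h
  simp only
  split_ifs <;> first | rfl | omega
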